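-- pv_equiv track=rewrite | github.com/LeonardoQSilva/PICodigos | 04 - Matrizes/operacoes_matrizes.py | matriz_simetrica
-- ===== SOURCE A (Python) =====
-- def matriz_simetrica( m: int, n: int ) -> list:
--     M = list()
--     for i in range(m):
--         linha = list()
--         for j in range(n):
--             valor = abs(i - j)
--             linha.append(valor)
--         M.append(linha)
--     return M
-- ===== SOURCE B (Python) =====
-- def matriz_simetrica(m: int, n: int) -> list:
--     # Toeplitz structure: every entry abs(i-j) lives in one diagonal table;
--     # each row is a reversed slice of that table.
--     if m <= 0:
--         return []
--     n = max(n, 0)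
--     T = [abs(k - (n - 1)) for k in range(m + n - 1)]
--     return [T[i:i + n][::-1] for i in range(m)]
-- ===== Notes on version B (the rewrite author's own statement) =====
-- stated objective: alternative
-- what changed: Replaces the nested elementwise abs loop by building a single diagonal value table once and producing each row as a reversed slice of it (Toeplitz decomposition).
import Mathlib
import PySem

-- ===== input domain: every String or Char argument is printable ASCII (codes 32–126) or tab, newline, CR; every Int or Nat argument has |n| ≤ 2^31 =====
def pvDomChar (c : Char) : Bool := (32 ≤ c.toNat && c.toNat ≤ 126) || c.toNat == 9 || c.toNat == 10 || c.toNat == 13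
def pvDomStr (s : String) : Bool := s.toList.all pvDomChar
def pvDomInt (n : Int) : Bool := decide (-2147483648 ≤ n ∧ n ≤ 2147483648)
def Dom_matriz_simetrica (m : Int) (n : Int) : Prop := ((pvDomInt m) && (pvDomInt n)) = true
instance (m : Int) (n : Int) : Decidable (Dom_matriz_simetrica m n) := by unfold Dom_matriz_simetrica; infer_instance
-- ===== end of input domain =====

-- B replaces A's nested abs loop by one diagonal value table plus a reversed slice per row
-- (Toeplitz decomposition); same cost, different traversal (objective: alternative).


-- ===== PORT A =====
-- list(range(k)) for one-argument range, ported by hand: exact (empty when k ≤ 0),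
-- and evaluates in linear time.
def pvRange (k : Int) : List Int := (List.range k.toNat).map Int.ofNat

-- Python's O(1) list.append is ported as a cons accumulator with one final reverse
-- (same list, same traversal order, linear evaluation instead of quadratic ++).
def matriz_simetrica (m : Int) (n : Int) : List (List Int) :=
  ((pvRange m).foldl (fun M i =>
    ((pvRange n).foldl (fun linha j => |i - j| :: linha) []).reverse :: M) []).reverse

-- ===== PORT B =====
-- Source B's row comprehension [T[i:i+n][::-1] for i in range(m)]: since T[i:i+n] is
-- exactly take-n of the i-th suffix of T, the recursion carries that suffix along
-- (t.tail per step) so each row is t[:n][::-1] of the current suffix — the same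
-- slice values, evaluated in linear time (tail-recursive with an accumulator).
def pvAltRows (t : List Int) (nn : Int) : Nat → List (List Int) → List (List Int)
  | 0, acc => acc.reverse
  | Nat.succ k, acc => pvAltRows t.tail nn k ((PySem.List.slice t none (some nn)).reverse :: acc)

def matriz_simetrica_alt (m : Int) (n : Int) : List (List Int) :=
  if m ≤ 0 then [] else
  let n' := max n 0
  let T := (pvRange (m + n' - 1)).map (fun k => |k - (n' - 1)|)
  pvAltRows T n' m.toNat []

-- ===== PRECONDITION & SPEC =====
def Spec_matriz_simetrica (m : Int) (n : Int) (out : List (List Int)) : Prop := out = matriz_simetrica_alt m n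
instance (m : Int) (n : Int) (out : List (List Int)) : Decidable (Spec_matriz_simetrica m n out) := by unfold Spec_matriz_simetrica; infer_instance

-- ===== CLAIM (what is proved, stated in full; the proofs are below) =====
def Claim_equal_matriz_simetrica : Prop := ∀ (m : Int) (n : Int), Dom_matriz_simetrica m n → Spec_matriz_simetrica m n (matriz_simetrica m n)

-- ===== LEMMAS AND PROOFS =====

-- 'for … append' accumulation by cons is a reversed map
theorem pv_foldl_cons_map {α β : Type} (xs : List α) (f : α → β) (init : List β) :
    xs.foldl (fun acc x => f x :: acc) init = (xs.map f).reverse ++ init := by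
  induction xs generalizing init with
  | nil => simp
  | cons a t ih => simp [List.foldl_cons, ih]

-- the suffix-carrying recursion computes drop-then-take slices of the original table
theorem pvAltRows_eq (nn : Int) (k : Nat) (t : List Int) (acc : List (List Int)) :
    pvAltRows t nn k acc =
      acc.reverse ++
        (List.range k).map (fun i => (PySem.List.slice (t.drop i) none (some nn)).reverse) := by
  induction k generalizing t acc with
  | zero => simp [pvAltRows]
  | succ k ih =>
      rw [List.range_succ_eq_map]
      simp only [pvAltRows, List.map_cons, List.map_map, List.drop_zero]
      rw [ih t.tail]
      simp only [List.reverse_cons, List.append_assoc, List.cons_append, List.nil_append]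
      refine congrArg _ (congrArg₂ _ rfl ?_)
      apply List.map_congr_left
      intro i _
      simp [Function.comp]

-- one row of A equals one row of B, for 0 ≤ a < m
theorem pv_row_eq (m n : Int) (a : Nat) (him : (a : Int) < m) :
    (pvRange n).map (fun j => |(a : Int) - j|) =
      (PySem.List.slice (((pvRange (m + max n 0 - 1)).map
          (fun k => |k - (max n 0 - 1)|)).drop a) none (some (max n 0))).reverse := by
  set b : Nat := n.toNat with hb
  have hmax : max n 0 = (b : Int) := by omega
  rw [hmax, PySem.List.slice_to_natCast]
  simp only [pvRange]
  set L : Nat := (m + (b : Int) - 1).toNat with hL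
  have hLb : b = 0 ∨ a + b ≤ L := by omega
  rcases hLb with hb0 | hle
  · rw [show n.toNat = b from hb.symm, hb0]; simp
  · apply List.ext_getElem
    · simp; omega
    · intro j h1 h2
      simp only [List.length_map, List.length_range] at h1
      simp only [List.getElem_reverse, List.getElem_take, List.getElem_drop,
        List.getElem_map, List.getElem_range, List.length_take, List.length_drop,
        List.length_map, List.length_range]
      have hmin : min b (L - a) = b := by omega
      rw [hmin]
      simp only [Int.ofNat_eq_natCast]
      congr 1
      omega

-- ===== VERDICT (by name: the statement is the Claim_ definition above) =====
theorem matriz_simetrica_spec : Claim_equal_matriz_simetrica := by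
  intro m n _
  unfold Spec_matriz_simetrica matriz_simetrica matriz_simetrica_alt
  by_cases hm : m ≤ 0
  · have : m.toNat = 0 := by omega
    simp [hm, pvRange, this]
  · simp only [if_neg hm]
    rw [pv_foldl_cons_map, List.append_nil, List.reverse_reverse, pvAltRows_eq]
    simp only [List.reverse_nil, List.nil_append]
    have hpv : pvRange m = (List.range m.toNat).map Int.ofNat := rfl
    rw [hpv, List.map_map]
    apply List.map_congr_left
    intro a ha
    rw [List.mem_range] at ha
    have him : (a : Int) < m := by omega
    have hrow : ((pvRange n).foldl
        (fun linha j => |(a : Int) - j| :: linha) []).reverse =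
        (pvRange n).map (fun j => |(a : Int) - j|) := by
      rw [pv_foldl_cons_map, List.append_nil, List.reverse_reverse]
    simp only [Function.comp, Int.ofNat_eq_natCast]
    rw [hrow]
    exact pv_row_eq m n a him
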